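-- pv_equiv track=rewrite | github.com/pypi-data/pypi-mirror-346 | packages/lavender-data/lavender_data-0.0.10-py3-none-any.whl/lavender_data/server/services/shardsets.py | span
-- ===== SOURCE A (Python) =====
-- def span(index: int, shard_samples: list[int]) -> tuple[int, int]:
--     sample_index = index
--     shard_index = 0
--     for samples in shard_samples:
--         if sample_index < samples:
--             break
--         else:
--             sample_index -= samples
--             shard_index += 1
--
--     return (shard_index, sample_index)
-- ===== SOURCE B (Python) =====
-- from itertools import accumulate
-- from bisect import bisect_right
--
--
-- def span(index: int, shard_samples: list[int]) -> tuple[int, int]: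
--     prefix = list(accumulate(shard_samples))
--     shard_index = bisect_right(prefix, index)
--     offset = index - (prefix[shard_index - 1] if shard_index > 0 else 0)
--     return (shard_index, offset)
-- ===== Notes on version B (the rewrite author's own statement) =====
-- stated objective: alternative
-- what changed: Replaces the subtract-as-you-go linear scan with a precomputed prefix-sum table plus a bisect_right binary search; the offset is recovered from the previous prefix sum.
-- outside the precondition, e.g. on span(3, [5, -4, 2]): A returns (0, 3), B returns (3, 0)
import Mathlib
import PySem

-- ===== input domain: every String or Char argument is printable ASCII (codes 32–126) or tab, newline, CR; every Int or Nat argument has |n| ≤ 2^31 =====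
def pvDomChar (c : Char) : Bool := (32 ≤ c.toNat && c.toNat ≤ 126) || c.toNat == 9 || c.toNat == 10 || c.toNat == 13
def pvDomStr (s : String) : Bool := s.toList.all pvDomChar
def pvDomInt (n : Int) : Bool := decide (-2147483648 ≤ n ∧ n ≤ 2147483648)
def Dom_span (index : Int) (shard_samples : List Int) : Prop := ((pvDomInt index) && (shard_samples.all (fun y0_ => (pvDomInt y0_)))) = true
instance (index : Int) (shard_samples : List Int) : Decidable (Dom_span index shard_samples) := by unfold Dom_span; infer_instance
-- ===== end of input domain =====

-- B replaces A's subtract-as-you-go linear scan by a prefix_-sum table plus bisect_right binary search (alternative decomposition, same asymptotic cost).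


-- ===== PORT A =====
def spanLoop (sample_index shard_index : Int) : List Int → Int × Int
  | [] => (shard_index, sample_index)
  | samples :: rest =>
      if sample_index < samples then (shard_index, sample_index)
      else spanLoop (sample_index - samples) (shard_index + 1) rest

def span (index : Int) (shard_samples : List Int) : Int × Int :=
  spanLoop index 0 shard_samples

-- ===== PORT B =====
-- itertools.accumulate(shard_samples): running sums
def accumP (acc : Int) : List Int → List Int
  | [] => []
  | s :: rest => (acc + s) :: accumP (acc + s) rest

def span_alt (index : Int) (shard_samples : List Int) : Int × Int :=
  let prefix_ := accumP 0 shard_samples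
  let shard_index := PySem.List.bisectRight prefix_ index
  let offset := index - (if 0 < shard_index then prefix_.getD (shard_index - 1) 0 else 0)
  ((shard_index : Int), offset)

-- ===== PRECONDITION & SPEC =====
-- Pre_ restricts to the natural domain of shard sample COUNTS (all nonnegative); on lists with a
-- negative entry the prefix_ table is unsorted and bisect's answer is meaningless, while A still returns a value.
def Pre_span (index : Int) (shard_samples : List Int) : Prop := ∀ s ∈ shard_samples, 0 ≤ s
instance (index : Int) (shard_samples : List Int) : Decidable (Pre_span index shard_samples) := by unfold Pre_span; infer_instance
def pvWitness_span : Int × List Int := (3, [2, 2])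

def Spec_span (index : Int) (shard_samples : List Int) (out : Int × Int) : Prop := out = span_alt index shard_samples
instance (index : Int) (shard_samples : List Int) (out : Int × Int) : Decidable (Spec_span index shard_samples out) := by unfold Spec_span; infer_instance

-- ===== CLAIM (what is proved, stated in full; the proofs are below) =====
def Claim_equal_span : Prop := ∀ (index : Int) (shard_samples : List Int), Dom_span index shard_samples → Pre_span index shard_samples → Spec_span index shard_samples (span index shard_samples)

-- ===== LEMMAS AND PROOFS =====

-- the shard index A's loop stops at
def firstBreak (index : Int) : List Int → Nat
  | [] => 0
  | s :: rest => if index < s then 0 else firstBreak (index - s) rest + 1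

theorem firstBreak_le_length (index : Int) (l : List Int) : firstBreak index l ≤ l.length := by
  induction l generalizing index with
  | nil => simp [firstBreak]
  | cons s rest ih =>
      simp only [firstBreak, List.length_cons]
      split
      · omega
      · have := ih (index - s); omega

theorem spanLoop_eq_fb (index sh : Int) (l : List Int) :
    spanLoop index sh l = (sh + (firstBreak index l : Int), index - (l.take (firstBreak index l)).sum) := by
  induction l generalizing index sh with
  | nil => simp [spanLoop, firstBreak]
  | cons s rest ih =>
      simp only [spanLoop, firstBreak]
      split
      · simp
      · rw [ih]
        simp only [List.take_succ_cons, List.sum_cons, Prod.mk.injEq]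
        constructor
        · push_cast; ring
        · ring

theorem fb_lower (index : Int) (l : List Int) (j : Nat) (hj : j < firstBreak index l) :
    (l.take (j + 1)).sum ≤ index := by
  induction l generalizing index j with
  | nil => simp [firstBreak] at hj
  | cons s rest ih =>
      simp only [firstBreak] at hj
      split at hj
      · omega
      · rename_i hns
        cases j with
        | zero => simp; omega
        | succ j' =>
            have := ih (index - s) j' (by omega)
            simp only [List.take_succ_cons, List.sum_cons]
            omega

theorem fb_upper (index : Int) (l : List Int) (hk : firstBreak index l < l.length) :
    index < (l.take (firstBreak index l + 1)).sum := by
  induction l generalizing index with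
  | nil => simp at hk
  | cons s rest ih =>
      simp only [firstBreak, List.length_cons] at hk ⊢
      by_cases hns : index < s
      · rw [if_pos hns]; simpa using hns
      · rw [if_neg hns] at hk ⊢
        have := ih (index - s) (by omega)
        simp only [List.take_succ_cons, List.sum_cons]
        omega

theorem accumP_length (a : Int) (l : List Int) : (accumP a l).length = l.length := by
  induction l generalizing a with
  | nil => simp [accumP]
  | cons s rest ih => simp [accumP, ih]

theorem accumP_getElem (a : Int) (l : List Int) (j : Nat) (hj : j < l.length)
    (hj' : j < (accumP a l).length) :
    (accumP a l)[j] = a + (l.take (j + 1)).sum := by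
  induction l generalizing a j with
  | nil => simp at hj
  | cons s rest ih =>
      cases j with
      | zero => simp [accumP]
      | succ j' =>
          simp only [accumP, List.getElem_cons_succ, List.take_succ_cons, List.sum_cons]
          rw [ih (a + s) j' (by simpa using hj) (by simpa [accumP_length] using hj')]
          ring

theorem accumP_le_mem (b : Int) (l : List Int) (hnn : ∀ x ∈ l, 0 ≤ x) :
    ∀ y ∈ accumP b l, b ≤ y := by
  induction l generalizing b with
  | nil => simp [accumP]
  | cons s rest ih =>
      intro y hy
      have hs : 0 ≤ s := hnn s (by simp)
      simp only [accumP, List.mem_cons] at hy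
      rcases hy with rfl | hy
      · omega
      · have := ih (b + s) (fun x hx => hnn x (by simp [hx])) y hy
        omega

theorem accumP_pairwise (a : Int) (l : List Int) (hnn : ∀ x ∈ l, 0 ≤ x) :
    List.Pairwise (· ≤ ·) (accumP a l) := by
  induction l generalizing a with
  | nil => simp [accumP]
  | cons s rest ih =>
      simp only [accumP, List.pairwise_cons]
      exact ⟨accumP_le_mem (a + s) rest (fun x hx => hnn x (by simp [hx])),
             ih (a + s) (fun x hx => hnn x (by simp [hx]))⟩

theorem bisect_eq_fb (index : Int) (l : List Int) (hnn : ∀ x ∈ l, 0 ≤ x) :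
    PySem.List.bisectRight (accumP 0 l) index = firstBreak index l := by
  obtain ⟨hle, hlow, hhigh⟩ := PySem.List.bisectRight_spec (accumP 0 l) index (accumP_pairwise 0 l hnn)
  set i := PySem.List.bisectRight (accumP 0 l) index with hi
  set k := firstBreak index l with hk
  have hklen := firstBreak_le_length index l
  rw [accumP_length] at hle
  by_contra hne
  rcases Nat.lt_or_ge i k with h | h
  · -- i < k : prefix_[i] ≤ index (fb_lower) but index < prefix_[i] (bisect upper)
    have h1 : (l.take (i + 1)).sum ≤ index := fb_lower index l i h
    have h2 := hhigh i (by rw [accumP_length]; omega) (le_refl i)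
    rw [accumP_getElem 0 l i (by omega) (by rw [accumP_length]; omega)] at h2
    omega
  · have hik : k < i := by omega
    -- k < i : index < prefix_[k] (fb_upper) but prefix_[k] ≤ index (bisect lower)
    have h1 : index < (l.take (k + 1)).sum := fb_upper index l (by omega)
    have h2 := hlow k (by rw [accumP_length]; omega) hik
    rw [accumP_getElem 0 l k (by omega) (by rw [accumP_length]; omega)] at h2
    omega

-- ===== VERDICT (by name: the statement is the Claim_ definition above) =====
theorem span_spec : Claim_equal_span := by
  intro index l _ hpre
  unfold Spec_span span
  rw [spanLoop_eq_fb]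
  simp only [span_alt]
  rw [bisect_eq_fb index l hpre]
  set k := firstBreak index l with hk
  have hklen := firstBreak_le_length index l
  by_cases hk0 : 0 < k
  · rw [if_pos hk0]
    rw [List.getD_eq_getElem (accumP 0 l) 0 (by rw [accumP_length]; omega)]
    rw [accumP_getElem 0 l (k - 1) (by omega) (by rw [accumP_length]; omega)]
    have : k - 1 + 1 = k := by omega
    rw [this]
    simp
  · rw [if_neg hk0]
    have : k = 0 := by omega
    simp [this]
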